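-- pv_equiv track=rewrite | github.com/vvhiteboard/algorithm | 2019_kakao/1.py | solution
-- ===== SOURCE A (Python) =====
-- class ChatRoom:
--     def __init__(self):
--         self.user_info = {}
--         self.messages = []
--
--     def change_user_info(self, user_id, nickname):
--         self.user_info[user_id] = nickname
--
--     def join(self, cmd, user_id):
--         if cmd == "Enter":
--             self.messages.append("%s님이 들어왔습니다." % self.user_info[user_id])
--         elif cmd == "Leave":
--             self.messages.append("%s님이 나갔습니다." % self.user_info[user_id])
--
-- def solution(record):
--     chat_room = ChatRoom()
--
--     for command in record:
--         cmd = command.split(" ")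
--
--         if cmd[0] == "Change" or cmd[0] == "Enter":
--             chat_room.change_user_info(cmd[1], cmd[2])
--
--     for command in record:
--         cmd = command.split(" ")
--
--         chat_room.join(cmd[0], cmd[1])
--
--     return chat_room.messages
-- ===== SOURCE B (Python) =====
-- def solution(record):
--     nick = {}
--     pending = []
--     for command in record:
--         parts = command.split(" ")
--         act = parts[0]
--         if act == "Enter":
--             nick[parts[1]] = parts[2]
--             pending.append((parts[1], True))
--         elif act == "Change":
--             nick[parts[1]] = parts[2]
--         elif act == "Leave":
--             pending.append((parts[1], False))
--     return ["%s님이 %s" % (nick[uid], "들어왔습니다." if entered else "나갔습니다.")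
--             for uid, entered in pending]
-- ===== Notes on version B (the rewrite author's own statement) =====
-- stated objective: alternative
-- what changed: Single pass that splits each command once, maintaining the nickname dict and an ordered pending-event list of (id, action) tuples, with the messages rendered afterwards from that list, instead of A's two full passes over record each re-splitting and re-dispatching every command.
import Mathlib
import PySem

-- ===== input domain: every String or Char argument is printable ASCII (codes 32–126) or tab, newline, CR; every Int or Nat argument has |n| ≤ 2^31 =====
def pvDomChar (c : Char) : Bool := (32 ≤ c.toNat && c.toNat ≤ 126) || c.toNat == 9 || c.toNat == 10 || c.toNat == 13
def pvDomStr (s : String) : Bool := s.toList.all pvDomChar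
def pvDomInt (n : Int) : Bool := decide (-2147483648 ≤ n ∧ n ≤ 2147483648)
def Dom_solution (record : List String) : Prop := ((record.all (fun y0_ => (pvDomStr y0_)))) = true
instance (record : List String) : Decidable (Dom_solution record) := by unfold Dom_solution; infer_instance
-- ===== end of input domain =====

-- B replaces A's two full passes over `record` (each re-splitting every command, the second
-- re-dispatching on it) with a single pass that splits each command once, building the
-- nickname dict and an ordered pending-event list, then renders the messages from that list.

-- command.split(" "): sep is the nonempty literal " ", so split? is always `some`
def pvSplit (s : String) : List String := (PySem.Str.split? s " ").getD []

-- ===== PORT A =====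
-- first loop body: `if cmd[0] == "Change" or cmd[0] == "Enter": user_info[cmd[1]] = cmd[2]`
-- (out-of-range `cmd[1]`/`cmd[2]` raise IndexError in Python; the `.getD ""` defaults are
--  reached only outside Pre_solution)
def pvStepA1 (d : PySem.Dict String String) (command : String) : PySem.Dict String String :=
  let cmd := pvSplit command
  if (PySem.List.pyGet? cmd 0).getD "" = "Change" ∨ (PySem.List.pyGet? cmd 0).getD "" = "Enter" then
    d.insert ((PySem.List.pyGet? cmd 1).getD "") ((PySem.List.pyGet? cmd 2).getD "")
  else d

-- ChatRoom.join: KeyError on a missing user_id is outside Pre_solution (`.getD ""` unreachable there)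
def pvJoinA (ui : PySem.Dict String String) (msgs : List String) (cmd0 cmd1 : String) : List String :=
  if cmd0 = "Enter" then msgs ++ [((ui.get? cmd1).getD "") ++ "님이 들어왔습니다."]
  else if cmd0 = "Leave" then msgs ++ [((ui.get? cmd1).getD "") ++ "님이 나갔습니다."]
  else msgs

def solution (record : List String) : List String :=
  let ui := record.foldl pvStepA1 PySem.Dict.empty
  record.foldl (fun msgs command =>
    let cmd := pvSplit command
    pvJoinA ui msgs ((PySem.List.pyGet? cmd 0).getD "") ((PySem.List.pyGet? cmd 1).getD "")) []

-- ===== PORT B =====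
-- single-pass step: update the nickname dict and append (id, is_enter) pending events
def pvStepB (st : PySem.Dict String String × List (String × Bool)) (command : String) :
    PySem.Dict String String × List (String × Bool) :=
  let parts := pvSplit command
  let act := (PySem.List.pyGet? parts 0).getD ""
  let p1 := (PySem.List.pyGet? parts 1).getD ""
  let p2 := (PySem.List.pyGet? parts 2).getD ""
  if act = "Enter" then (st.1.insert p1 p2, st.2 ++ [(p1, true)])
  else if act = "Change" then (st.1.insert p1 p2, st.2)
  else if act = "Leave" then (st.1, st.2 ++ [(p1, false)])
  else st

-- renders the pending events with the final nicknames (B's closing list comprehension)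
def pvRenderB (st : PySem.Dict String String × List (String × Bool)) : List String :=
  st.2.map (fun e =>
    ((st.1.get? e.1).getD "") ++ "님이 " ++ (if e.2 then "들어왔습니다." else "나갔습니다."))

def solution_alt (record : List String) : List String :=
  pvRenderB (record.foldl pvStepB (PySem.Dict.empty, []))

-- ===== PRECONDITION & SPEC =====
-- Pre_solution excludes exactly the inputs on which Python A raises: a command with fewer
-- than 2 space-separated tokens (IndexError on cmd[1] in the second loop), an
-- "Enter"/"Change" command with fewer than 3 tokens (IndexError on cmd[2]), and a "Leave"
-- whose user id was never given a nickname by any "Enter"/"Change" command (KeyError).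
def Pre_solution (record : List String) : Prop :=
  ∀ s ∈ record,
    2 ≤ (pvSplit s).length ∧
    (((pvSplit s).headD "" = "Change" ∨ (pvSplit s).headD "" = "Enter") →
      3 ≤ (pvSplit s).length) ∧
    ((pvSplit s).headD "" = "Leave" →
      ∃ s' ∈ record,
        ((pvSplit s').headD "" = "Change" ∨ (pvSplit s').headD "" = "Enter") ∧
        PySem.List.pyGet? (pvSplit s') 1 = PySem.List.pyGet? (pvSplit s) 1)
instance (record : List String) : Decidable (Pre_solution record) := by unfold Pre_solution; infer_instance

def pvWitness_solution : List String :=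
  ["Enter uid1234 Muzi", "Leave uid1234", "Enter uid1234 Prodo", "Change uid4567 Ryan", "Enter uid4567 x"]

def Spec_solution (record : List String) (out : List String) : Prop := out = solution_alt record
instance (record : List String) (out : List String) : Decidable (Spec_solution record out) := by unfold Spec_solution; infer_instance

-- ===== CLAIM (what is proved, stated in full; the proofs are below) =====
def Claim_equal_solution : Prop := ∀ (record : List String), Dom_solution record → Pre_solution record → Spec_solution record (solution record)

-- ===== LEMMAS AND PROOFS =====

-- the ordered pending-event list B accumulates, as a standalone recursion
def pvEvents : List String → List (String × Bool)
  | [] => []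
  | c :: rest =>
    let parts := pvSplit c
    let act := (PySem.List.pyGet? parts 0).getD ""
    let p1 := (PySem.List.pyGet? parts 1).getD ""
    (if act = "Enter" then [(p1, true)] else if act = "Leave" then [(p1, false)] else []) ++ pvEvents rest

theorem pvStepB_fst (d : PySem.Dict String String) (p : List (String × Bool)) (c : String) :
    (pvStepB (d, p) c).1 = pvStepA1 d c := by
  unfold pvStepB pvStepA1
  dsimp only
  split_ifs <;> simp_all

-- the events a single command contributes
def pvEv1 (c : String) : List (String × Bool) :=
  let act := (PySem.List.pyGet? (pvSplit c) 0).getD ""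
  let p1 := (PySem.List.pyGet? (pvSplit c) 1).getD ""
  if act = "Enter" then [(p1, true)] else if act = "Leave" then [(p1, false)] else []

theorem pvEvents_cons (c : String) (rest : List String) :
    pvEvents (c :: rest) = pvEv1 c ++ pvEvents rest := rfl

theorem pvStepB_snd (d : PySem.Dict String String) (p : List (String × Bool)) (c : String) :
    (pvStepB (d, p) c).2 = p ++ pvEv1 c := by
  unfold pvStepB pvEv1
  dsimp only
  split_ifs <;> simp_all

theorem foldl_stepB_fst (record : List String) (d : PySem.Dict String String)
    (p : List (String × Bool)) :
    (record.foldl pvStepB (d, p)).1 = record.foldl pvStepA1 d := by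
  induction record generalizing d p with
  | nil => rfl
  | cons c rest ih =>
    simp only [List.foldl_cons]
    rw [show pvStepB (d, p) c = ((pvStepB (d, p) c).1, (pvStepB (d, p) c).2) from rfl,
        pvStepB_fst, ih]

theorem foldl_stepB_snd (record : List String) (d : PySem.Dict String String)
    (p : List (String × Bool)) :
    (record.foldl pvStepB (d, p)).2 = p ++ pvEvents record := by
  induction record generalizing d p with
  | nil => simp [pvEvents]
  | cons c rest ih =>
    simp only [List.foldl_cons]
    rw [show pvStepB (d, p) c = ((pvStepB (d, p) c).1, (pvStepB (d, p) c).2) from rfl,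
        ih, pvStepB_snd, pvEvents_cons, List.append_assoc]

theorem pvAppend_msg (s : String) (b : Bool) :
    s ++ "님이 " ++ (if b then "들어왔습니다." else "나갔습니다.") =
      s ++ (if b then "님이 들어왔습니다." else "님이 나갔습니다.") := by
  cases b <;> rw [String.append_assoc] <;> rfl

theorem joinA_one (ui : PySem.Dict String String) (msgs : List String) (c : String) :
    pvJoinA ui msgs ((PySem.List.pyGet? (pvSplit c) 0).getD "")
        ((PySem.List.pyGet? (pvSplit c) 1).getD "")
      = msgs ++ (pvEv1 c).map (fun e =>
          ((ui.get? e.1).getD "") ++ "님이 " ++ (if e.2 then "들어왔습니다." else "나갔습니다.")) := by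
  unfold pvJoinA pvEv1
  dsimp only
  split_ifs <;> simp_all [pvAppend_msg]

theorem foldl_joinA (record : List String) (ui : PySem.Dict String String) (msgs : List String) :
    record.foldl (fun msgs command =>
        let cmd := pvSplit command
        pvJoinA ui msgs ((PySem.List.pyGet? cmd 0).getD "") ((PySem.List.pyGet? cmd 1).getD "")) msgs
      = msgs ++ (pvEvents record).map (fun e =>
          ((ui.get? e.1).getD "") ++ "님이 " ++ (if e.2 then "들어왔습니다." else "나갔습니다.")) := by
  induction record generalizing msgs with
  | nil => simp [pvEvents]
  | cons c rest ih =>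
    simp only [List.foldl_cons]
    rw [show (let cmd := pvSplit c;
          pvJoinA ui msgs ((PySem.List.pyGet? cmd 0).getD "") ((PySem.List.pyGet? cmd 1).getD ""))
        = pvJoinA ui msgs ((PySem.List.pyGet? (pvSplit c) 0).getD "")
            ((PySem.List.pyGet? (pvSplit c) 1).getD "") from rfl,
        joinA_one, ih, pvEvents_cons, List.map_append, List.append_assoc]

-- ===== VERDICT (by name: the statement is the Claim_ definition above) =====
theorem solution_spec : Claim_equal_solution := by
  intro record _ _
  unfold Spec_solution solution solution_alt pvRenderB
  rw [foldl_joinA, foldl_stepB_fst, foldl_stepB_snd]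
  simp
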